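-- pv_equiv track=rewrite | github.com/DixonJames/AI-search-Coursework-2020 | ldzc78/AlgBAdvanced.py | build_distance_matrix
-- ===== SOURCE A (Python) =====
-- def build_distance_matrix(num_cities, distances, city_format):
--     dist_matrix = []
--     i = 0
--     if city_format == "full":
--         for j in range(num_cities):
--             row = []
--             for k in range(0, num_cities):
--                 row.append(distances[i])
--                 i = i + 1
--             dist_matrix.append(row)
--     elif city_format == "upper_tri":
--         for j in range(0, num_cities):
--             row = []
--             for k in range(j):
--                 row.append(0)
--             for k in range(num_cities - j):
--                 row.append(distances[i])
--                 i = i + 1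
--             dist_matrix.append(row)
--     else:
--         for j in range(0, num_cities):
--             row = []
--             for k in range(j + 1):
--                 row.append(0)
--             for k in range(0, num_cities - (j + 1)):
--                 row.append(distances[i])
--                 i = i + 1
--             dist_matrix.append(row)
--     if city_format == "upper_tri" or city_format == "strict_upper_tri":
--         for i in range(0, num_cities):
--             for j in range(0, num_cities):
--                 if i > j:
--                     dist_matrix[i][j] = dist_matrix[j][i]
--     return dist_matrix
-- ===== SOURCE B (Python) =====
-- def build_distance_matrix(num_cities, distances, city_format):
--     # Closed-form indexing: each cell reads its entry of `distances` directly,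
--     # instead of a sequential counter plus a separate mirror pass.
--     n = num_cities
--     if city_format == "full":
--         return [[distances[j * n + k] for k in range(n)] for j in range(n)]
--     if city_format == "upper_tri":
--         def idx(a, b):
--             return a * n - a * (a - 1) // 2 + (b - a)
--         return [[distances[idx(min(j, k), max(j, k))] for k in range(n)]
--                 for j in range(n)]
--     # strict upper triangle; mirrored only for the exact format "strict_upper_tri"
--     def idx(a, b):
--         return a * (n - 1) - a * (a - 1) // 2 + (b - a - 1)
--     mirror = city_format == "strict_upper_tri"
--     return [[distances[idx(j, k)] if j < k
--              else (distances[idx(k, j)] if mirror and k < j else 0)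
--              for k in range(n)]
--             for j in range(n)]
-- ===== Notes on version B (the rewrite author's own statement) =====
-- stated objective: simpler
-- what changed: B computes each cell directly from a closed-form index into the flat distances list (triangular-number arithmetic plus min/max for the mirrored half), replacing A's sequential counter fill followed by a separate full-matrix mirror pass.
import Mathlib
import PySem

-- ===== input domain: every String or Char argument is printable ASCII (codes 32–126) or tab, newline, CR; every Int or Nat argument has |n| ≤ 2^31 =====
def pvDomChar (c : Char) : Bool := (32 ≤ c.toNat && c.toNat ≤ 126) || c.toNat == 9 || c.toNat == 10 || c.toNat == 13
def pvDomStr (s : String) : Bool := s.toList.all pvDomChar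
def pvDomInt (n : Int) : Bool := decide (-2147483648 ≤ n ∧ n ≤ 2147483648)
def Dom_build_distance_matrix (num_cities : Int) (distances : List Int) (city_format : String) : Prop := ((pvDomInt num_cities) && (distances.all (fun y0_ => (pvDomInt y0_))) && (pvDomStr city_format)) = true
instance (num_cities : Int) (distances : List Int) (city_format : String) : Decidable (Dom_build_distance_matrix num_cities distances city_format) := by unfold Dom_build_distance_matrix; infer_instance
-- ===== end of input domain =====

-- B replaces A's sequential-counter fill plus separate mirror pass by a closed-form
-- index into the flat list for each cell (objective: simpler; same O(n^2) cost).

-- ===== PORT A =====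
-- indexing distances[i] is ported as pyGetD with default 0; Pre_ below guarantees
-- every index read is in range (exactly where the Python returns without IndexError).
def build_distance_matrix (num_cities : Int) (distances : List Int) (city_format : String) : List (List Int) :=
  let fill : List (List Int) × Int :=
    if city_format == "full" then
      (PySem.List.pyRange 0 num_cities 1).foldl (fun (st : List (List Int) × Int) _j =>
        let rw := (PySem.List.pyRange 0 num_cities 1).foldl
          (fun (rw : List Int × Int) _k => (rw.1 ++ [PySem.List.pyGetD distances rw.2 0], rw.2 + 1))
          ([], st.2)
        (st.1 ++ [rw.1], rw.2)) ([], 0)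
    else if city_format == "upper_tri" then
      (PySem.List.pyRange 0 num_cities 1).foldl (fun (st : List (List Int) × Int) j =>
        let row0 := (PySem.List.pyRange 0 j 1).foldl (fun (r : List Int) _k => r ++ [(0 : Int)]) []
        let rw := (PySem.List.pyRange 0 (num_cities - j) 1).foldl
          (fun (rw : List Int × Int) _k => (rw.1 ++ [PySem.List.pyGetD distances rw.2 0], rw.2 + 1))
          (row0, st.2)
        (st.1 ++ [rw.1], rw.2)) ([], 0)
    else
      (PySem.List.pyRange 0 num_cities 1).foldl (fun (st : List (List Int) × Int) j =>
        let row0 := (PySem.List.pyRange 0 (j + 1) 1).foldl (fun (r : List Int) _k => r ++ [(0 : Int)]) []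
        let rw := (PySem.List.pyRange 0 (num_cities - (j + 1)) 1).foldl
          (fun (rw : List Int × Int) _k => (rw.1 ++ [PySem.List.pyGetD distances rw.2 0], rw.2 + 1))
          (row0, st.2)
        (st.1 ++ [rw.1], rw.2)) ([], 0)
  let m := fill.1
  if city_format == "upper_tri" || city_format == "strict_upper_tri" then
    (PySem.List.pyRange 0 num_cities 1).foldl (fun m i =>
      (PySem.List.pyRange 0 num_cities 1).foldl (fun m j =>
        if i > j then
          PySem.List.pySetD m i (PySem.List.pySetD (PySem.List.pyGetD m i []) j
            (PySem.List.pyGetD (PySem.List.pyGetD m j []) i 0))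
        else m) m) m
  else m

-- ===== PORT B =====
def build_distance_matrix_alt (num_cities : Int) (distances : List Int) (city_format : String) : List (List Int) :=
  let n := num_cities
  if city_format == "full" then
    (PySem.List.pyRange 0 n 1).map (fun j =>
      (PySem.List.pyRange 0 n 1).map (fun k => PySem.List.pyGetD distances (j * n + k) 0))
  else if city_format == "upper_tri" then
    let idx := fun (a b : Int) => a * n - PySem.Int.floordiv (a * (a - 1)) 2 + (b - a)
    (PySem.List.pyRange 0 n 1).map (fun j =>
      (PySem.List.pyRange 0 n 1).map (fun k =>
        PySem.List.pyGetD distances (idx (min j k) (max j k)) 0))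
  else
    let idx := fun (a b : Int) => a * (n - 1) - PySem.Int.floordiv (a * (a - 1)) 2 + (b - a - 1)
    let mirror := city_format == "strict_upper_tri"
    (PySem.List.pyRange 0 n 1).map (fun j =>
      (PySem.List.pyRange 0 n 1).map (fun k =>
        if j < k then PySem.List.pyGetD distances (idx j k) 0
        else if mirror && decide (k < j) then PySem.List.pyGetD distances (idx k j) 0
        else 0))

-- ===== PRECONDITION & SPEC =====
-- Pre_ excludes exactly the inputs on which the Python A raises IndexError:
-- a distances list shorter than the number of entries the chosen format consumes.
def Pre_build_distance_matrix (num_cities : Int) (distances : List Int) (city_format : String) : Prop :=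
  num_cities ≤ 0 ∨
    (if city_format = "full" then num_cities * num_cities ≤ distances.length
     else if city_format = "upper_tri" then num_cities * (num_cities + 1) ≤ 2 * distances.length
     else num_cities * (num_cities - 1) ≤ 2 * distances.length)
instance (num_cities : Int) (distances : List Int) (city_format : String) : Decidable (Pre_build_distance_matrix num_cities distances city_format) := by unfold Pre_build_distance_matrix; infer_instance

def pvWitness_build_distance_matrix : Int × List Int × String := (2, [7, 3, 4, 9], "full")

def Spec_build_distance_matrix (num_cities : Int) (distances : List Int) (city_format : String) (out : List (List Int)) : Prop := out = build_distance_matrix_alt num_cities distances city_format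
instance (num_cities : Int) (distances : List Int) (city_format : String) (out : List (List Int)) : Decidable (Spec_build_distance_matrix num_cities distances city_format out) := by unfold Spec_build_distance_matrix; infer_instance

-- ===== CLAIM (what is proved, stated in full; the proofs are below) =====
def Claim_equal_build_distance_matrix : Prop := ∀ (num_cities : Int) (distances : List Int) (city_format : String), Dom_build_distance_matrix num_cities distances city_format → Pre_build_distance_matrix num_cities distances city_format → Spec_build_distance_matrix num_cities distances city_format (build_distance_matrix num_cities distances city_format)

-- ===== LEMMAS AND PROOFS =====

lemma pvFillFold (d : List Int) (l : List Int) : ∀ (r0 : List Int) (i0 : Int),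
    l.foldl (fun (rw : List Int × Int) _k => (rw.1 ++ [PySem.List.pyGetD d rw.2 0], rw.2 + 1)) (r0, i0)
      = (r0 ++ (List.range l.length).map (fun (t : Nat) => PySem.List.pyGetD d (i0 + (t : Int)) 0),
         i0 + (l.length : Int)) := by
  induction l with
  | nil => intro r0 i0; simp
  | cons x xs ih =>
    intro r0 i0
    simp only [List.foldl_cons, ih]
    refine Prod.ext ?_ ?_
    · rw [show (x :: xs).length = xs.length + 1 from rfl, List.range_succ_eq_map]
      simp only [List.map_cons, List.map_map, Nat.cast_zero, add_zero, Function.comp_def,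
        List.append_assoc, List.cons_append, List.nil_append]
      congr 1
      refine congrArg₂ _ rfl (List.map_congr_left ?_)
      intro a _
      congr 1
      push_cast; ring
    · simp only [List.length_cons]; push_cast; ring

lemma pvTriStep (j : Int) :
    PySem.Int.floordiv ((j + 1) * j) 2 = PySem.Int.floordiv (j * (j - 1)) 2 + j := by
  rw [PySem.Int.floordiv_eq_ediv_of_pos (by norm_num), PySem.Int.floordiv_eq_ediv_of_pos (by norm_num)]
  obtain ⟨t, ht⟩ := Int.even_mul_succ_self (j - 1)
  have h1 : j * (j - 1) = t + t := by rw [show j*(j-1) = (j-1)*(j-1+1) by ring, ht]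
  have h2 : (j + 1) * j = t + t + 2 * j := by rw [show (j+1)*j = (j-1)*(j-1+1) + 2*j by ring, ht]
  rw [h1, h2]; omega

lemma pvZerosFold (j : Int) :
    (PySem.List.pyRange 0 j 1).foldl (fun (r : List Int) _k => r ++ [(0 : Int)]) []
      = List.replicate j.toNat (0 : Int) := by
  rw [PySem.List.foldl_append_singleton_eq_map (f := fun _ => (0:Int))]
  simp [List.map_const', PySem.List.length_pyRange_one]

lemma pvOuterFold (row : Int → Int → List Int) (cnt : Int → Int) (off : Int → Int) (b : Int) :
    ∀ (m : Nat) (a : Int), (b - a).toNat = m →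
    (∀ j, a ≤ j → j < b → off (j + 1) = off j + cnt j) →
    ∀ (acc : List (List Int)) (i0 : Int), i0 = off a →
    (PySem.List.pyRange a b 1).foldl
        (fun (st : List (List Int) × Int) j => (st.1 ++ [row j st.2], st.2 + cnt j)) (acc, i0)
      = (acc ++ (PySem.List.pyRange a b 1).map (fun j => row j (off j)), off (max a b)) := by
  intro m
  induction m with
  | zero =>
    intro a hm _ acc i0 hi0
    have hba : b ≤ a := by omega
    rw [PySem.List.pyRange_one_eq_nil hba]
    simp [hi0, max_eq_left hba]
  | succ k ih =>
    intro a hm hoff acc i0 hi0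
    have hab : a < b := by omega
    rw [PySem.List.pyRange_one_cons hab]
    simp only [List.foldl_cons, hi0]
    rw [ih (a + 1) (by omega) (fun j h1 h2 => hoff j (by omega) h2) (acc ++ [row a (off a)])
      (off a + cnt a) (hoff a le_rfl hab).symm]
    rw [List.append_assoc]
    refine Prod.ext ?_ ?_
    · simp
    · show off (max (a + 1) b) = off (max a b)
      congr 1
      omega

-- the 'full' branch: sequential fill row by row equals closed-form rows
lemma pvFull (n : Int) (d : List Int) :
    ((PySem.List.pyRange 0 n 1).foldl (fun (st : List (List Int) × Int) _j =>
        let rw := (PySem.List.pyRange 0 n 1).foldl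
          (fun (rw : List Int × Int) _k => (rw.1 ++ [PySem.List.pyGetD d rw.2 0], rw.2 + 1))
          ([], st.2)
        (st.1 ++ [rw.1], rw.2)) ([], 0)).1
    = (PySem.List.pyRange 0 n 1).map (fun j =>
        (PySem.List.pyRange 0 n 1).map (fun k => PySem.List.pyGetD d (j * n + k) 0)) := by
  have hstep : (fun (st : List (List Int) × Int) (_j : Int) =>
      let rw := (PySem.List.pyRange 0 n 1).foldl
        (fun (rw : List Int × Int) _k => (rw.1 ++ [PySem.List.pyGetD d rw.2 0], rw.2 + 1))
        ([], st.2)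
      (st.1 ++ [rw.1], rw.2))
      = fun (st : List (List Int) × Int) (j : Int) =>
        (st.1 ++ [(fun (j i0 : Int) => (List.range n.toNat).map
            (fun (t : Nat) => PySem.List.pyGetD d (i0 + (t : Int)) 0)) j st.2],
         st.2 + (fun (_j : Int) => (n.toNat : Int)) j) := by
    funext st j
    rw [pvFillFold]
    simp [PySem.List.length_pyRange_one]
  rw [hstep]
  rw [pvOuterFold (fun (_j i0 : Int) => (List.range n.toNat).map
        (fun (t : Nat) => PySem.List.pyGetD d (i0 + (t : Int)) 0))
      (fun (_j : Int) => (n.toNat : Int)) (fun j => j * n) n (n - 0).toNat 0 rfl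
    (by intro j h1 h2
        have hn : ((n.toNat : Int)) = n := by omega
        have : (j + 1) * n = j * n + n := by ring
        simp only []
        omega)
    [] 0 (by ring)]
  simp only [List.nil_append]
  refine List.map_congr_left ?_
  intro j _
  rw [PySem.List.pyRange_one]
  simp [List.map_map, Function.comp_def]

-- getD after set, fully guarded
lemma pvGetD_set {α : Type} (l : List α) (i j : Nat) (v : α) (d : α) :
    (l.set i v).getD j d = if i = j ∧ i < l.length then v else l.getD j d := by
  rcases Nat.lt_or_ge j l.length with hj | hj
  · by_cases h : i = j
    · subst h
      by_cases hi : i < l.length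
      · simp [List.getD, hi]
      · simp [List.getD, hi, List.set_eq_of_length_le (by omega)]
    · simp [List.getD, List.getElem?_set_ne h, h]
  · have h2 : j ≥ (l.set i v).length := by simpa using hj
    rw [List.getD_eq_getElem?_getD, List.getElem?_eq_none_iff.2 (by simpa using h2),
      List.getD_eq_getElem?_getD, List.getElem?_eq_none_iff.2 (by simpa using hj)]
    simp only [Option.getD_none]
    rw [if_neg (by rintro ⟨h1, hlt⟩; omega)]

-- the mirror step at Nat level
def pvStep (r : Nat) (m : List (List Int)) (c : Nat) : List (List Int) :=
  if c < r then m.set r ((m.getD r []).set c ((m.getD c []).getD r 0)) else m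

lemma pvInnerMirror (N r : Nat) (m : List (List Int)) (hm : m.length = N) (hrN : r < N)
    (hrow : (m.getD r []).length = N) :
    ∀ (b : Nat), b ≤ N →
    let M := (List.range b).foldl (pvStep r) m
    (∀ i, i ≠ r → M.getD i [] = m.getD i []) ∧ M.length = N ∧ (M.getD r []).length = N ∧
    (∀ c, (M.getD r []).getD c 0 = if c < b ∧ c < r then (m.getD c []).getD r 0
                                   else (m.getD r []).getD c 0) := by
  intro b
  induction b with
  | zero =>
    intro _
    exact ⟨fun i _ => rfl, hm, hrow, fun c => by
      simp only [List.range_zero, List.foldl_nil]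
      rw [if_neg (by omega)]⟩
  | succ k ih =>
    intro hb
    obtain ⟨hA, hB, hC, hD⟩ := ih (by omega)
    set M := (List.range k).foldl (pvStep r) m with hM
    have hstep : (List.range (k+1)).foldl (pvStep r) m = pvStep r M k := by
      rw [List.range_succ, List.foldl_append]; rfl
    by_cases hk : k < r
    · -- real write at column k
      have hMr : r < M.length := by omega
      refine ⟨?_, ?_, ?_, ?_⟩
      · intro i hi
        rw [hstep]
        simp only [pvStep, if_pos hk]
        rw [pvGetD_set, if_neg (by rintro ⟨h, _⟩; exact hi h.symm)]
        exact hA i hi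
      · rw [hstep]; simp only [pvStep, if_pos hk]; simpa using hB
      · rw [hstep]; simp only [pvStep, if_pos hk]
        rw [pvGetD_set, if_pos ⟨rfl, hMr⟩, List.length_set]
        exact hC
      · intro c
        rw [hstep]
        simp only [pvStep, if_pos hk]
        rw [pvGetD_set, if_pos ⟨rfl, hMr⟩, pvGetD_set]
        rw [hA k (by omega)]
        by_cases hc : k = c
        · subst hc
          rw [if_pos ⟨rfl, by omega⟩, if_pos ⟨by omega, hk⟩]
        · rw [if_neg (by rintro ⟨h, _⟩; exact hc h)]
          rw [hD c]
          by_cases h1 : c < k ∧ c < r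
          · rw [if_pos h1, if_pos ⟨by omega, h1.2⟩]
          · rw [if_neg h1, if_neg (by rintro ⟨ha, hb2⟩; exact h1 ⟨by omega, hb2⟩)]
    · -- no write
      have hid : pvStep r M k = M := by simp [pvStep, hk]
      refine ⟨?_, ?_, ?_, ?_⟩
      · intro i hi; rw [hstep, hid]; exact hA i hi
      · rw [hstep, hid]; exact hB
      · rw [hstep, hid]; exact hC
      · intro c
        rw [hstep, hid, hD c]
        by_cases h1 : c < k ∧ c < r
        · rw [if_pos h1, if_pos ⟨by omega, h1.2⟩]
        · rw [if_neg h1, if_neg (by rintro ⟨ha, hb2⟩; exact h1 ⟨by omega, hb2⟩)]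

lemma pvOuterMirror (N : Nat) (m0 : List (List Int)) (hm : m0.length = N)
    (hrow : ∀ i, i < N → (m0.getD i []).length = N) :
    ∀ (a : Nat), a ≤ N →
    let M := (List.range a).foldl (fun m r => (List.range N).foldl (pvStep r) m) m0
    M.length = N ∧ (∀ i, i < N → (M.getD i []).length = N) ∧
    (∀ i c, i < N → (M.getD i []).getD c 0 =
        if c < i ∧ i < a then (m0.getD c []).getD i 0 else (m0.getD i []).getD c 0) := by
  intro a
  induction a with
  | zero =>
    intro _
    refine ⟨hm, hrow, fun i c hi => ?_⟩
    simp only [List.range_zero, List.foldl_nil]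
    rw [if_neg (by omega)]
  | succ a ih =>
    intro ha
    obtain ⟨hL, hR, hV⟩ := ih (by omega)
    set Ma := (List.range a).foldl (fun m r => (List.range N).foldl (pvStep r) m) m0 with hMa
    have hstep : (List.range (a+1)).foldl (fun m r => (List.range N).foldl (pvStep r) m) m0
        = (List.range N).foldl (pvStep a) Ma := by
      rw [List.range_succ, List.foldl_append]; rfl
    obtain ⟨hA, hB, hC, hD⟩ := pvInnerMirror N a Ma hL (by omega) (hR a (by omega)) N le_rfl
    refine ⟨?_, ?_, ?_⟩
    · rw [hstep]; exact hB
    · intro i hi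
      rw [hstep]
      by_cases hia : i = a
      · subst hia; exact hC
      · rw [hA i hia]; exact hR i hi
    · intro i c hi
      rw [hstep]
      by_cases hia : i = a
      · subst hia
        rw [hD c]
        by_cases hc : c < i
        · rw [if_pos ⟨by omega, hc⟩, hV c i (by omega), if_neg (by omega),
            if_pos ⟨hc, by omega⟩]
        · rw [if_neg (by rintro ⟨_, h⟩; exact hc h), hV i c hi, if_neg (by omega),
            if_neg (by rintro ⟨h, _⟩; exact hc h)]
      · rw [hA i hia, hV i c hi]
        by_cases h1 : c < i ∧ i < a
        · rw [if_pos h1, if_pos ⟨h1.1, by omega⟩]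
        · rw [if_neg h1, if_neg (by rintro ⟨hx, hy⟩; exact h1 ⟨hx, by omega⟩)]

lemma pvMirrorConv (n : Int) (m : List (List Int)) :
    (PySem.List.pyRange 0 n 1).foldl (fun m i =>
      (PySem.List.pyRange 0 n 1).foldl (fun m j =>
        if i > j then
          PySem.List.pySetD m i (PySem.List.pySetD (PySem.List.pyGetD m i []) j
            (PySem.List.pyGetD (PySem.List.pyGetD m j []) i 0))
        else m) m) m
    = (List.range n.toNat).foldl (fun m r => (List.range n.toNat).foldl (pvStep r) m) m := by
  simp only [PySem.List.pyRange_one, sub_zero, zero_add, List.foldl_map, gt_iff_lt,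
    Nat.cast_lt, PySem.List.pySetD_natCast, PySem.List.pyGetD_natCast]
  rfl

lemma pvRowGet {α : Type} (F : Int → α) (n : Int) (r : Nat) (dflt : α) (hr : (r : Int) < n) :
    ((PySem.List.pyRange 0 n 1).map F).getD r dflt = F ↑r := by
  have hlen : r < ((PySem.List.pyRange 0 n 1).map F).length := by
    simp [PySem.List.length_pyRange_one]; omega
  rw [List.getD_eq_getElem _ _ hlen]
  simp [PySem.List.getElem_pyRange_one]

lemma pvGetD_append {α : Type} (l1 l2 : List α) (i : Nat) (d : α) :
    (l1 ++ l2).getD i d = if i < l1.length then l1.getD i d else l2.getD (i - l1.length) d := by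
  by_cases h : i < l1.length
  · rw [if_pos h, List.getD_eq_getElem?_getD, List.getElem?_append_left h,
      ← List.getD_eq_getElem?_getD]
  · rw [if_neg h, List.getD_eq_getElem?_getD, List.getElem?_append_right (by omega),
      ← List.getD_eq_getElem?_getD]

lemma pvGetD_map_range {α : Type} (f : Nat → α) (m i : Nat) (d : α) :
    ((List.range m).map f).getD i d = if i < m then f i else d := by
  by_cases h : i < m
  · rw [if_pos h, List.getD_eq_getElem _ _ (by simpa using h)]
    simp
  · rw [if_neg h, List.getD_eq_getElem?_getD, List.getElem?_eq_none_iff.2 (by simpa using h)]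
    rfl

-- entry of the pre-mirror matrix: zI j zeros, then sequential entries at offset off j
lemma pvPreEntry (g : Int → Int) (n : Int) (zI off : Int → Int) (r c : Nat)
    (hr : (r : Int) < n) (hc : (c : Int) < n) (hz : 0 ≤ zI ↑r) (hzn : zI ↑r ≤ n) :
    (((PySem.List.pyRange 0 n 1).map (fun j => List.replicate (zI j).toNat 0 ++
        (List.range (n - zI j).toNat).map (fun (t : Nat) => g (off j + (t : Int))))).getD r []).getD c 0
      = if (c : Int) < zI ↑r then 0 else g (off ↑r + ((c : Int) - zI ↑r)) := by
  rw [pvRowGet _ n r [] hr, pvGetD_append]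
  simp only [List.length_replicate]
  by_cases h : c < (zI ↑r).toNat
  · rw [if_pos h, if_pos (by omega)]
    rw [List.getD_eq_getElem _ _ (by simpa using h)]
    simp
  · rw [if_neg h, pvGetD_map_range, if_pos (by omega), if_neg (by omega)]
    congr 1
    omega

-- the 'upper_tri' pre-mirror fill
lemma pvFillUpper (n : Int) (d : List Int) :
    ((PySem.List.pyRange 0 n 1).foldl (fun (st : List (List Int) × Int) j =>
        let row0 := (PySem.List.pyRange 0 j 1).foldl (fun (r : List Int) _k => r ++ [(0 : Int)]) []
        let rw := (PySem.List.pyRange 0 (n - j) 1).foldl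
          (fun (rw : List Int × Int) _k => (rw.1 ++ [PySem.List.pyGetD d rw.2 0], rw.2 + 1))
          (row0, st.2)
        (st.1 ++ [rw.1], rw.2)) ([], 0)).1
    = (PySem.List.pyRange 0 n 1).map (fun j => List.replicate j.toNat 0 ++
        (List.range (n - j).toNat).map (fun (t : Nat) =>
          PySem.List.pyGetD d ((j * n - PySem.Int.floordiv (j * (j - 1)) 2) + (t : Int)) 0)) := by
  have hstep : (fun (st : List (List Int) × Int) (j : Int) =>
      let row0 := (PySem.List.pyRange 0 j 1).foldl (fun (r : List Int) _k => r ++ [(0 : Int)]) []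
      let rw := (PySem.List.pyRange 0 (n - j) 1).foldl
        (fun (rw : List Int × Int) _k => (rw.1 ++ [PySem.List.pyGetD d rw.2 0], rw.2 + 1))
        (row0, st.2)
      (st.1 ++ [rw.1], rw.2))
      = fun (st : List (List Int) × Int) (j : Int) =>
        (st.1 ++ [(fun (j i0 : Int) => List.replicate j.toNat 0 ++ (List.range (n - j).toNat).map
            (fun (t : Nat) => PySem.List.pyGetD d (i0 + (t : Int)) 0)) j st.2],
         st.2 + (fun (j : Int) => ((n - j).toNat : Int)) j) := by
    funext st j
    simp only [pvZerosFold, pvFillFold, PySem.List.length_pyRange_one, sub_zero]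
  rw [hstep]
  rw [pvOuterFold (fun (j i0 : Int) => List.replicate j.toNat 0 ++ (List.range (n - j).toNat).map
        (fun (t : Nat) => PySem.List.pyGetD d (i0 + (t : Int)) 0))
      (fun (j : Int) => ((n - j).toNat : Int))
      (fun j => j * n - PySem.Int.floordiv (j * (j - 1)) 2) n (n - 0).toNat 0 rfl
      (by intro j h1 h2
          have ht := pvTriStep j
          have hc : ((n - j).toNat : Int) = n - j := by omega
          have hr : (j + 1) * n = j * n + n := by ring
          have he : (j + 1) * ((j + 1) - 1) = (j + 1) * j := by ring
          simp only []
          rw [he, ht]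
          linarith)
      [] 0 (by
        simp only []
        rw [show (0 : Int) * ((0 : Int) - 1) = 0 by ring,
          PySem.Int.floordiv_eq_ediv_of_pos (by norm_num)]
        norm_num)]
  simp

-- mirrored upper_tri result equals the closed-form symmetric matrix
lemma pvUpperEq (n : Int) (d : List Int) :
    (PySem.List.pyRange 0 n 1).foldl (fun m i =>
      (PySem.List.pyRange 0 n 1).foldl (fun m j =>
        if i > j then
          PySem.List.pySetD m i (PySem.List.pySetD (PySem.List.pyGetD m i []) j
            (PySem.List.pyGetD (PySem.List.pyGetD m j []) i 0))
        else m) m)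
      ((PySem.List.pyRange 0 n 1).map (fun j => List.replicate j.toNat 0 ++
        (List.range (n - j).toNat).map (fun (t : Nat) =>
          PySem.List.pyGetD d ((j * n - PySem.Int.floordiv (j * (j - 1)) 2) + (t : Int)) 0)))
    = (PySem.List.pyRange 0 n 1).map (fun j =>
        (PySem.List.pyRange 0 n 1).map (fun k =>
          PySem.List.pyGetD d (min j k * n - PySem.Int.floordiv (min j k * (min j k - 1)) 2
            + (max j k - min j k)) 0)) := by
  rw [pvMirrorConv]
  have hm : ((PySem.List.pyRange 0 n 1).map (fun j => List.replicate j.toNat 0 ++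
      (List.range (n - j).toNat).map (fun (t : Nat) =>
        PySem.List.pyGetD d ((j * n - PySem.Int.floordiv (j * (j - 1)) 2) + (t : Int)) 0))).length
      = n.toNat := by
    simp [PySem.List.length_pyRange_one]
  have hrow : ∀ i, i < n.toNat → ((((PySem.List.pyRange 0 n 1).map (fun j => List.replicate j.toNat 0 ++
      (List.range (n - j).toNat).map (fun (t : Nat) =>
        PySem.List.pyGetD d ((j * n - PySem.Int.floordiv (j * (j - 1)) 2) + (t : Int)) 0))).getD i []).length)
      = n.toNat := by
    intro i hi
    rw [pvRowGet _ n i [] (by omega)]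
    simp
    omega
  obtain ⟨hL, hR, hV⟩ := pvOuterMirror n.toNat _ hm hrow n.toNat le_rfl
  apply List.ext_getElem
  · rw [hL]; simp [PySem.List.length_pyRange_one]
  · intro i h1 h2
    have hiN : i < n.toNat := by rw [← hL]; exact h1
    have hin : (i : Int) < n := by omega
    have hBrow : ((PySem.List.pyRange 0 n 1).map (fun j =>
        (PySem.List.pyRange 0 n 1).map (fun k =>
          PySem.List.pyGetD d (min j k * n - PySem.Int.floordiv (min j k * (min j k - 1)) 2
            + (max j k - min j k)) 0)))[i]
        = (PySem.List.pyRange 0 n 1).map (fun k =>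
          PySem.List.pyGetD d (min ↑i k * n - PySem.Int.floordiv (min ↑i k * (min ↑i k - 1)) 2
            + (max ↑i k - min ↑i k)) 0) := by
      rw [← List.getD_eq_getElem _ [] h2, pvRowGet _ n i [] hin]
    rw [hBrow, ← List.getD_eq_getElem _ [] h1]
    apply List.ext_getElem
    · rw [hR i hiN]; simp [PySem.List.length_pyRange_one]
    · intro c hc1 hc2
      have hcN : c < n.toNat := by rw [hR i hiN] at hc1; exact hc1
      have hcn : (c : Int) < n := by omega
      rw [← List.getD_eq_getElem _ 0 hc1, ← List.getD_eq_getElem _ 0 hc2,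
        pvRowGet _ n c 0 hcn, hV i c hiN]
      by_cases hci : c < i
      · rw [if_pos ⟨hci, hiN⟩,
          pvPreEntry (fun x => PySem.List.pyGetD d x 0) n (fun j => j) _ c i hcn hin
            (by show (0:Int) ≤ (c:Int); positivity) (by show ((c:Int)) ≤ n; omega),
          if_neg (by show ¬ ((i:Int) < (c:Int)); omega), min_eq_right (by exact_mod_cast Nat.le_of_lt hci),
          max_eq_left (by exact_mod_cast Nat.le_of_lt hci)]
      · rw [if_neg (by tauto),
          pvPreEntry (fun x => PySem.List.pyGetD d x 0) n (fun j => j) _ i c hin hcn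
            (by show (0:Int) ≤ (i:Int); positivity) (by show ((i:Int)) ≤ n; omega),
          if_neg (by show ¬ ((c:Int) < (i:Int)); omega), min_eq_left (by exact_mod_cast Nat.le_of_not_lt hci),
          max_eq_right (by exact_mod_cast Nat.le_of_not_lt hci)]

-- the strict (else-branch) pre-mirror fill
lemma pvFillStrict (n : Int) (d : List Int) :
    ((PySem.List.pyRange 0 n 1).foldl (fun (st : List (List Int) × Int) j =>
        let row0 := (PySem.List.pyRange 0 (j + 1) 1).foldl (fun (r : List Int) _k => r ++ [(0 : Int)]) []
        let rw := (PySem.List.pyRange 0 (n - (j + 1)) 1).foldl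
          (fun (rw : List Int × Int) _k => (rw.1 ++ [PySem.List.pyGetD d rw.2 0], rw.2 + 1))
          (row0, st.2)
        (st.1 ++ [rw.1], rw.2)) ([], 0)).1
    = (PySem.List.pyRange 0 n 1).map (fun j => List.replicate (j + 1).toNat 0 ++
        (List.range (n - (j + 1)).toNat).map (fun (t : Nat) =>
          PySem.List.pyGetD d ((j * (n - 1) - PySem.Int.floordiv (j * (j - 1)) 2) + (t : Int)) 0)) := by
  have hstep : (fun (st : List (List Int) × Int) (j : Int) =>
      let row0 := (PySem.List.pyRange 0 (j + 1) 1).foldl (fun (r : List Int) _k => r ++ [(0 : Int)]) []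
      let rw := (PySem.List.pyRange 0 (n - (j + 1)) 1).foldl
        (fun (rw : List Int × Int) _k => (rw.1 ++ [PySem.List.pyGetD d rw.2 0], rw.2 + 1))
        (row0, st.2)
      (st.1 ++ [rw.1], rw.2))
      = fun (st : List (List Int) × Int) (j : Int) =>
        (st.1 ++ [(fun (j i0 : Int) => List.replicate (j + 1).toNat 0 ++ (List.range (n - (j + 1)).toNat).map
            (fun (t : Nat) => PySem.List.pyGetD d (i0 + (t : Int)) 0)) j st.2],
         st.2 + (fun (j : Int) => ((n - (j + 1)).toNat : Int)) j) := by
    funext st j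
    simp only [pvZerosFold, pvFillFold, PySem.List.length_pyRange_one, sub_zero]
  rw [hstep]
  rw [pvOuterFold (fun (j i0 : Int) => List.replicate (j + 1).toNat 0 ++ (List.range (n - (j + 1)).toNat).map
        (fun (t : Nat) => PySem.List.pyGetD d (i0 + (t : Int)) 0))
      (fun (j : Int) => ((n - (j + 1)).toNat : Int))
      (fun j => j * (n - 1) - PySem.Int.floordiv (j * (j - 1)) 2) n (n - 0).toNat 0 rfl
      (by intro j h1 h2
          have ht := pvTriStep j
          have hc : ((n - (j + 1)).toNat : Int) = n - (j + 1) := by omega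
          have hr : (j + 1) * (n - 1) = j * (n - 1) + (n - 1) := by ring
          have he : (j + 1) * ((j + 1) - 1) = (j + 1) * j := by ring
          simp only []
          rw [he, ht]
          linarith)
      [] 0 (by
        simp only []
        rw [show (0 : Int) * ((0 : Int) - 1) = 0 by ring,
          PySem.Int.floordiv_eq_ediv_of_pos (by norm_num)]
        norm_num)]
  simp

-- strict fill without the mirror pass (any other format string)
lemma pvStrictPlainEq (n : Int) (d : List Int) :
    ((PySem.List.pyRange 0 n 1).map (fun j => List.replicate (j + 1).toNat 0 ++
        (List.range (n - (j + 1)).toNat).map (fun (t : Nat) =>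
          PySem.List.pyGetD d ((j * (n - 1) - PySem.Int.floordiv (j * (j - 1)) 2) + (t : Int)) 0)))
    = (PySem.List.pyRange 0 n 1).map (fun j =>
        (PySem.List.pyRange 0 n 1).map (fun k =>
          if j < k then
            PySem.List.pyGetD d (j * (n - 1) - PySem.Int.floordiv (j * (j - 1)) 2 + (k - j - 1)) 0
          else 0)) := by
  apply List.ext_getElem
  · simp
  · intro i h1 h2
    have hin : (i : Int) < n := by
      simp only [List.length_map, PySem.List.length_pyRange_one, sub_zero] at h1
      omega
    rw [← List.getD_eq_getElem _ [] h1, ← List.getD_eq_getElem _ [] h2]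
    apply List.ext_getElem
    · rw [pvRowGet _ n i [] hin, pvRowGet _ n i [] hin]
      simp only [List.length_append, List.length_replicate, List.length_map, List.length_range,
        PySem.List.length_pyRange_one, sub_zero]
      omega
    · intro c hc1 hc2
      have hcn : (c : Int) < n := by
        rw [pvRowGet _ n i [] hin] at hc2
        simp only [List.length_map, PySem.List.length_pyRange_one, sub_zero] at hc2
        omega
      rw [← List.getD_eq_getElem _ 0 hc1, ← List.getD_eq_getElem _ 0 hc2]
      rw [pvPreEntry (fun x => PySem.List.pyGetD d x 0) n (fun j => j + 1)
        (fun j => j * (n - 1) - PySem.Int.floordiv (j * (j - 1)) 2) i c hin hcn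
        (by show (0:Int) ≤ (i:Int) + 1; positivity) (by show ((i:Int)) + 1 ≤ n; omega)]
      rw [pvRowGet _ n i [] hin, pvRowGet _ n c 0 hcn]
      by_cases hic : (i : Int) < (c : Int)
      · rw [if_neg (by show ¬ ((c:Int) < (i:Int) + 1); omega), if_pos hic]
        congr 1
        ring
      · rw [if_pos (by show ((c:Int)) < (i:Int) + 1; omega), if_neg hic]

-- mirrored strict result equals the closed-form symmetric matrix with zero diagonal
lemma pvStrictMirrorEq (n : Int) (d : List Int) :
    (PySem.List.pyRange 0 n 1).foldl (fun m i =>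
      (PySem.List.pyRange 0 n 1).foldl (fun m j =>
        if i > j then
          PySem.List.pySetD m i (PySem.List.pySetD (PySem.List.pyGetD m i []) j
            (PySem.List.pyGetD (PySem.List.pyGetD m j []) i 0))
        else m) m)
      ((PySem.List.pyRange 0 n 1).map (fun j => List.replicate (j + 1).toNat 0 ++
        (List.range (n - (j + 1)).toNat).map (fun (t : Nat) =>
          PySem.List.pyGetD d ((j * (n - 1) - PySem.Int.floordiv (j * (j - 1)) 2) + (t : Int)) 0)))
    = (PySem.List.pyRange 0 n 1).map (fun j =>
        (PySem.List.pyRange 0 n 1).map (fun k =>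
          if j < k then
            PySem.List.pyGetD d (j * (n - 1) - PySem.Int.floordiv (j * (j - 1)) 2 + (k - j - 1)) 0
          else if k < j then
            PySem.List.pyGetD d (k * (n - 1) - PySem.Int.floordiv (k * (k - 1)) 2 + (j - k - 1)) 0
          else 0)) := by
  rw [pvMirrorConv]
  have hm : ((PySem.List.pyRange 0 n 1).map (fun j => List.replicate (j + 1).toNat 0 ++
      (List.range (n - (j + 1)).toNat).map (fun (t : Nat) =>
        PySem.List.pyGetD d ((j * (n - 1) - PySem.Int.floordiv (j * (j - 1)) 2) + (t : Int)) 0))).length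
      = n.toNat := by
    simp [PySem.List.length_pyRange_one]
  have hrow : ∀ i, i < n.toNat → ((((PySem.List.pyRange 0 n 1).map (fun j => List.replicate (j + 1).toNat 0 ++
      (List.range (n - (j + 1)).toNat).map (fun (t : Nat) =>
        PySem.List.pyGetD d ((j * (n - 1) - PySem.Int.floordiv (j * (j - 1)) 2) + (t : Int)) 0))).getD i []).length)
      = n.toNat := by
    intro i hi
    rw [pvRowGet _ n i [] (by omega)]
    simp
    omega
  obtain ⟨hL, hR, hV⟩ := pvOuterMirror n.toNat _ hm hrow n.toNat le_rfl
  apply List.ext_getElem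
  · rw [hL]; simp [PySem.List.length_pyRange_one]
  · intro i h1 h2
    have hiN : i < n.toNat := by rw [← hL]; exact h1
    have hin : (i : Int) < n := by omega
    rw [← List.getD_eq_getElem _ [] h1, ← List.getD_eq_getElem _ [] h2]
    apply List.ext_getElem
    · rw [hR i hiN, pvRowGet _ n i [] hin]
      simp [PySem.List.length_pyRange_one]
    · intro c hc1 hc2
      have hcN : c < n.toNat := by rw [hR i hiN] at hc1; exact hc1
      have hcn : (c : Int) < n := by omega
      rw [← List.getD_eq_getElem _ 0 hc1, ← List.getD_eq_getElem _ 0 hc2,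
        pvRowGet _ n i [] hin, pvRowGet _ n c 0 hcn, hV i c hiN]
      by_cases hci : c < i
      · rw [if_pos ⟨hci, hiN⟩,
          pvPreEntry (fun x => PySem.List.pyGetD d x 0) n (fun j => j + 1)
            (fun j => j * (n - 1) - PySem.Int.floordiv (j * (j - 1)) 2) c i hcn hin
            (by show (0:Int) ≤ (c:Int) + 1; positivity) (by show ((c:Int)) + 1 ≤ n; omega),
          if_neg (by show ¬ ((i:Int) < (c:Int) + 1); omega),
          if_neg (by show ¬ ((i:Int) < (c:Int)); omega),
          if_pos (by show ((c:Int)) < (i:Int); omega)]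
        congr 1
        ring
      · rw [if_neg (by tauto),
          pvPreEntry (fun x => PySem.List.pyGetD d x 0) n (fun j => j + 1)
            (fun j => j * (n - 1) - PySem.Int.floordiv (j * (j - 1)) 2) i c hin hcn
            (by show (0:Int) ≤ (i:Int) + 1; positivity) (by show ((i:Int)) + 1 ≤ n; omega)]
        by_cases hic : i < c
        · rw [if_neg (by show ¬ ((c:Int) < (i:Int) + 1); omega),
            if_pos (by show ((i:Int)) < (c:Int); omega)]
          congr 1
          ring
        · rw [if_pos (by show ((c:Int)) < (i:Int) + 1; omega),
            if_neg (by show ¬ ((i:Int) < (c:Int)); omega),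
            if_neg (by show ¬ ((c:Int) < (i:Int)); omega)]

-- ===== VERDICT (by name: the statement is the Claim_ definition above) =====
theorem build_distance_matrix_spec : Claim_equal_build_distance_matrix := by
  intro n d fmt _ _
  show build_distance_matrix n d fmt = build_distance_matrix_alt n d fmt
  by_cases h1 : fmt = "full"
  · subst h1
    exact pvFull n d
  · by_cases h2 : fmt = "upper_tri"
    · subst h2
      exact (congrArg (fun m => (PySem.List.pyRange 0 n 1).foldl (fun m i =>
          (PySem.List.pyRange 0 n 1).foldl (fun m j =>
            if i > j then
              PySem.List.pySetD m i (PySem.List.pySetD (PySem.List.pyGetD m i []) j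
                (PySem.List.pyGetD (PySem.List.pyGetD m j []) i 0))
            else m) m) m) (pvFillUpper n d)).trans (pvUpperEq n d)
    · by_cases h3 : fmt = "strict_upper_tri"
      · subst h3
        refine ((congrArg (fun m => (PySem.List.pyRange 0 n 1).foldl (fun m i =>
            (PySem.List.pyRange 0 n 1).foldl (fun m j =>
              if i > j then
                PySem.List.pySetD m i (PySem.List.pySetD (PySem.List.pyGetD m i []) j
                  (PySem.List.pyGetD (PySem.List.pyGetD m j []) i 0))
              else m) m) m) (pvFillStrict n d)).trans ?_)
        rw [pvStrictMirrorEq n d]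
        simp [build_distance_matrix_alt]
      · -- other format strings: strict fill, no mirror pass
        have b1 : (fmt == "full") = false := by simp [h1]
        have b2 : (fmt == "upper_tri") = false := by simp [h2]
        have b3 : (fmt == "strict_upper_tri") = false := by simp [h3]
        simp only [build_distance_matrix, build_distance_matrix_alt, b1, b2, b3,
          Bool.or_self, Bool.false_and, Bool.false_eq_true, if_false]
        exact (pvFillStrict n d).trans (pvStrictPlainEq n d)
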